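-- pv_equiv track=rewrite | github.com/hansendx/recoda | recoda/analyse/python/_understandability.py | _parse_pylint_output
-- ===== SOURCE A (Python) =====
-- def _parse_pylint_output(_pylint_output: str) -> int:
--     """ Parse pylint string and count Convention messages. """
--     _convention_error = 0
--     # We expect to get a consecutive string with \n between messages
--     _message_list = _pylint_output.split('\n')
--     for message in _message_list:
--         if message == 'E' or message == 'F':
--             # A python syntax error will block all other errors.
--             # We cannot use this, it would suppress the convention errors,
--             # giving this file a perfect score.
--             # This could come form a legit error
--             # or from py3 incompatibility.
--             return None
--         _convention_error = _convention_error + 1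
--
--     return _convention_error
-- ===== SOURCE B (Python) =====
-- def _parse_pylint_output(_pylint_output: str) -> int:
--     """ Parse pylint string and count Convention messages. """
--     # A bare 'E'/'F' line exists iff the whole string is that sentinel, or the
--     # sentinel sits at the start/end next to a newline, or between two newlines.
--     for w in ('E', 'F'):
--         if (_pylint_output == w
--                 or _pylint_output.startswith(w + '\n')
--                 or _pylint_output.endswith('\n' + w)
--                 or ('\n' + w + '\n') in _pylint_output):
--             return None
--     # Number of lines = number of separators + 1 (no list is built).
--     return _pylint_output.count('\n') + 1
-- ===== Notes on version B (the rewrite author's own statement) =====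
-- stated objective: alternative
-- what changed: B never splits the string into lines: it detects a bare 'E'/'F' line by four substring tests (whole-string equality, 'w\n' prefix, '\nw' suffix, '\nw\n' infix) and computes the line count as count('\n')+1 in closed form, instead of A's build-a-list-then-loop with a counter and early return.
import Mathlib
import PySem

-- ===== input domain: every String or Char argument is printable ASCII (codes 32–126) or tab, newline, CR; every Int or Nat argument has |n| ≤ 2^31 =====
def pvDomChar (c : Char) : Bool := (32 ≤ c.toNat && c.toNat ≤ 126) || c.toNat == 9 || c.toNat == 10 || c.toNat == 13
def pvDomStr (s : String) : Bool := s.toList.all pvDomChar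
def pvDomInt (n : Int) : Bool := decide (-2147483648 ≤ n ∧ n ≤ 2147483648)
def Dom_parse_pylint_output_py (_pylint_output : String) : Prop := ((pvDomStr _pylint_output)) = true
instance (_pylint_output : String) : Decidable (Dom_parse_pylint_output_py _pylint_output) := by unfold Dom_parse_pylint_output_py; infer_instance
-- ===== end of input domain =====

-- B avoids splitting into lines: four substring tests for a bare 'E'/'F' line plus count('\n')+1 (alternative, same cost).
-- ===== PORT A =====
-- the for-loop over the split message list, with counter and early return
def pvLoopA : List (List Char) → Int → Option Int
  | [], acc => some acc
  | m :: ms, acc =>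
      if m = ['E'] ∨ m = ['F'] then none
      else pvLoopA ms (acc + 1)

def parse_pylint_output_py (_pylint_output : String) : Option Int :=
  pvLoopA (PySem.Chars.splitOn _pylint_output.toList ['\n']) 0

-- ===== PORT B =====
def parse_pylint_output_py_alt (_pylint_output : String) : Option Int :=
  if _pylint_output = "E" ∨ _pylint_output = "F" then none
  else if PySem.Str.startswith _pylint_output "E\n" || PySem.Str.startswith _pylint_output "F\n" then none
  else if PySem.Str.endswith _pylint_output "\nE" || PySem.Str.endswith _pylint_output "\nF" then none
  else if PySem.Str.isIn "\nE\n" _pylint_output || PySem.Str.isIn "\nF\n" _pylint_output then none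
  else some ((PySem.Str.count _pylint_output "\n" : Int) + 1)

-- ===== PRECONDITION & SPEC =====
def Spec_parse_pylint_output_py (_pylint_output : String) (out : Option Int) : Prop := out = parse_pylint_output_py_alt _pylint_output
instance (_pylint_output : String) (out : Option Int) : Decidable (Spec_parse_pylint_output_py _pylint_output out) := by unfold Spec_parse_pylint_output_py; infer_instance

-- ===== CLAIM (what is proved, stated in full; the proofs are below) =====
def Claim_equal_parse_pylint_output_py : Prop := ∀ (_pylint_output : String), Dom_parse_pylint_output_py _pylint_output → Spec_parse_pylint_output_py _pylint_output (parse_pylint_output_py _pylint_output)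

-- ===== LEMMAS AND PROOFS =====

-- reference line-splitter: first line and the remaining lines of s, split at '\n'
def pvLinesP : List Char → List Char × List (List Char)
  | [] => ([], [])
  | c :: s =>
      let p := pvLinesP s
      if c = '\n' then ([], p.1 :: p.2) else (c :: p.1, p.2)

theorem pvSplitOn_go_eq (fuel : Nat) (s cur : List Char) (acc : List (List Char))
    (h : s.length < fuel) :
    PySem.Chars.splitOn.go ['\n'] fuel s cur acc =
      acc.reverse ++ ((cur.reverse ++ (pvLinesP s).1) :: (pvLinesP s).2) := by
  induction fuel generalizing s cur acc with
  | zero => omega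
  | succ n ih =>
      cases s with
      | nil => simp [PySem.Chars.splitOn.go, pvLinesP]
      | cons c rest =>
          by_cases hc : c = '\n'
          · subst hc
            rw [show PySem.Chars.splitOn.go ['\n'] (n+1) ('\n' :: rest) cur acc =
                  PySem.Chars.splitOn.go ['\n'] n rest [] (cur.reverse :: acc) from by
                simp [PySem.Chars.splitOn.go, List.isPrefixOf]]
            rw [ih rest [] (cur.reverse :: acc) (by simpa using h)]
            simp [pvLinesP]
          · rw [show PySem.Chars.splitOn.go ['\n'] (n+1) (c :: rest) cur acc =
                  PySem.Chars.splitOn.go ['\n'] n rest (c :: cur) acc from by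
                simp [PySem.Chars.splitOn.go, List.isPrefixOf]
                intro h; exact absurd h.symm hc]
            rw [ih rest (c :: cur) acc (by simpa using h)]
            simp [pvLinesP, hc]

theorem pvSplitOn_eq (s : List Char) :
    PySem.Chars.splitOn s ['\n'] = (pvLinesP s).1 :: (pvLinesP s).2 := by
  unfold PySem.Chars.splitOn
  rw [pvSplitOn_go_eq (s.length + 1) s [] [] (by omega)]
  simp

theorem pvCount_go_eq (fuel : Nat) (s : List Char) (acc : Nat) (h : s.length ≤ fuel) :
    PySem.Chars.count.go ['\n'] fuel s acc = acc + s.count '\n' := by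
  induction fuel generalizing s acc with
  | zero =>
      cases s with
      | nil => simp [PySem.Chars.count.go]
      | cons c rest => simp at h
  | succ n ih =>
      cases s with
      | nil => simp [PySem.Chars.count.go]
      | cons c rest =>
          by_cases hc : c = '\n'
          · subst hc
            rw [show PySem.Chars.count.go ['\n'] (n+1) ('\n' :: rest) acc =
                  PySem.Chars.count.go ['\n'] n rest (acc + 1) from by
                simp [PySem.Chars.count.go, List.isPrefixOf]]
            rw [ih rest (acc + 1) (by simpa using h)]
            simp [List.count_cons]
            omega
          · rw [show PySem.Chars.count.go ['\n'] (n+1) (c :: rest) acc =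
                  PySem.Chars.count.go ['\n'] n rest acc from by
                simp [PySem.Chars.count.go, List.isPrefixOf]
                intro h; exact absurd h.symm hc]
            rw [ih rest acc (by simpa using h)]
            simp [List.count_cons, hc]

theorem pvCount_eq (s : List Char) :
    PySem.Chars.count s ['\n'] = s.count '\n' := by
  unfold PySem.Chars.count
  rw [if_neg (by simp), pvCount_go_eq s.length s 0 le_rfl]
  simp

-- number of lines = number of '\n' + 1
theorem pvLines_length (s : List Char) :
    (pvLinesP s).2.length = s.count '\n' := by
  induction s with
  | nil => simp [pvLinesP]
  | cons c rest ih =>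
      by_cases hc : c = '\n' <;>
        simp [pvLinesP, hc, List.count_cons, ih]

-- the first line is empty iff s is empty or starts with '\n'
theorem pvLines_fst_nil (s : List Char) :
    (pvLinesP s).1 = [] ↔ s = [] ∨ ['\n'] <+: s := by
  cases s with
  | nil => simp [pvLinesP]
  | cons c rest =>
      by_cases hc : c = '\n'
      · subst hc; simp [pvLinesP, List.cons_prefix_cons]
      · simp only [pvLinesP, if_neg hc]
        constructor
        · intro h; exact absurd h (List.cons_ne_nil _ _)
        · rintro (h | h)
          · exact absurd h (List.cons_ne_nil _ _)
          · exact absurd (List.cons_prefix_cons.mp h).1 (fun he => hc he.symm)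

-- the first line equals [w] iff s = [w] or s starts with w '\n'
theorem pvLines_fst_eq (w : Char) (hw : w ≠ '\n') (s : List Char) :
    (pvLinesP s).1 = [w] ↔ s = [w] ∨ [w, '\n'] <+: s := by
  cases s with
  | nil => simp [pvLinesP]
  | cons c rest =>
      by_cases hc : c = '\n'
      · subst hc
        simp [pvLinesP, List.cons_prefix_cons, Ne.symm hw, hw]
      · simp only [pvLinesP, if_neg hc, List.cons.injEq, List.cons_prefix_cons]
        rw [pvLines_fst_nil rest]
        constructor
        · rintro ⟨h1, h2 | h2⟩
          · left; exact ⟨h1, h2⟩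
          · right; exact ⟨h1.symm, h2⟩
        · rintro (⟨h1, h2⟩ | ⟨h1, h2⟩)
          · exact ⟨h1, Or.inl h2⟩
          · exact ⟨h1.symm, Or.inr h2⟩

-- [w] occurs among the later lines iff '\n' w is a suffix or '\n' w '\n' an infix
theorem pvLines_snd_mem (w : Char) (hw : w ≠ '\n') (s : List Char) :
    [w] ∈ (pvLinesP s).2 ↔ ['\n', w] <:+ s ∨ ['\n', w, '\n'] <:+: s := by
  induction s with
  | nil => simp [pvLinesP]
  | cons c rest ih =>
      rw [List.suffix_cons_iff, List.infix_cons_iff]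
      by_cases hc : c = '\n'
      · subst hc
        simp only [pvLinesP, if_pos rfl, if_true, List.mem_cons]
        rw [@eq_comm _ [w] (pvLinesP rest).1, pvLines_fst_eq w hw, ih]
        constructor
        · rintro ((h | h) | (h | h))
          · left; left; rw [h]
          · right; left; rw [List.cons_prefix_cons]; exact ⟨rfl, h⟩
          · left; right; exact h
          · right; right; exact h
        · rintro ((h | h) | (h | h))
          · left; left; exact (List.cons_eq_cons.mp h.symm).2
          · right; left; exact h
          · left; right; exact (List.cons_prefix_cons.mp h).2
          · right; right; exact h
      · simp only [pvLinesP, if_neg hc]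
        rw [ih]
        constructor
        · rintro (h | h)
          · left; right; exact h
          · right; right; exact h
        · rintro ((h | h) | (h | h))
          · exact absurd (List.cons_eq_cons.mp h.symm).1 hc
          · left; exact h
          · exact absurd (List.cons_prefix_cons.mp h).1 (fun he => hc he.symm)
          · right; exact h

theorem pvLoopA_eq (l : List (List Char)) (acc : Int) :
    pvLoopA l acc =
      if l.contains ['E'] || l.contains ['F'] then none else some (acc + l.length) := by
  induction l generalizing acc with
  | nil => simp [pvLoopA]
  | cons m ms ih =>
      by_cases h : m = ['E'] ∨ m = ['F']
      · rcases h with h | h <;> simp [pvLoopA, h]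
      · push_neg at h
        simp [pvLoopA, h.1, h.2, ih, Ne.symm h.1, Ne.symm h.2]
        split
        · rfl
        · simp only [Option.some.injEq]; omega

-- ===== VERDICT (by name: the statement is the Claim_ definition above) =====
theorem parse_pylint_output_py_spec : Claim_equal_parse_pylint_output_py := by
  intro s _
  unfold Spec_parse_pylint_output_py parse_pylint_output_py parse_pylint_output_py_alt
  rw [pvSplitOn_eq, pvLoopA_eq]
  simp only [PySem.Str.startswith_eq, PySem.Str.endswith_eq, PySem.Str.isIn_eq,
    PySem.Str.count_eq, ← String.toList_inj,
    show ("E" : String).toList = ['E'] from by decide,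
    show ("F" : String).toList = ['F'] from by decide,
    show ("E\n" : String).toList = ['E', '\n'] from by decide,
    show ("F\n" : String).toList = ['F', '\n'] from by decide,
    show ("\nE" : String).toList = ['\n', 'E'] from by decide,
    show ("\nF" : String).toList = ['\n', 'F'] from by decide,
    show ("\nE\n" : String).toList = ['\n', 'E', '\n'] from by decide,
    show ("\nF\n" : String).toList = ['\n', 'F', '\n'] from by decide,
    show ("\n" : String).toList = ['\n'] from by decide]
  have memiff : ∀ w : Char, w ≠ '\n' →
      (([w] ∈ (pvLinesP s.toList).1 :: (pvLinesP s.toList).2) ↔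
        ((s.toList = [w] ∨ [w, '\n'] <+: s.toList) ∨
          (['\n', w] <:+ s.toList ∨ ['\n', w, '\n'] <:+: s.toList))) := by
    intro w hw
    rw [List.mem_cons, @eq_comm _ [w], pvLines_fst_eq w hw, pvLines_snd_mem w hw]
  have hGiff : ((['E'] ∈ (pvLinesP s.toList).1 :: (pvLinesP s.toList).2) ∨
      (['F'] ∈ (pvLinesP s.toList).1 :: (pvLinesP s.toList).2)) ↔
      ((s.toList = ['E'] ∨ s.toList = ['F']) ∨
        ((PySem.Chars.startswith s.toList ['E', '\n'] || PySem.Chars.startswith s.toList ['F', '\n']) = true) ∨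
        ((PySem.Chars.endswith s.toList ['\n', 'E'] || PySem.Chars.endswith s.toList ['\n', 'F']) = true) ∨
        ((PySem.Chars.isIn ['\n', 'E', '\n'] s.toList || PySem.Chars.isIn ['\n', 'F', '\n'] s.toList) = true)) := by
    rw [memiff 'E' (by decide), memiff 'F' (by decide)]
    simp only [Bool.or_eq_true, PySem.Chars.startswith_iff, PySem.Chars.endswith_iff,
      PySem.Chars.isIn_iff_infix]
    tauto
  by_cases hG : ((s.toList = ['E'] ∨ s.toList = ['F']) ∨
      ((PySem.Chars.startswith s.toList ['E', '\n'] || PySem.Chars.startswith s.toList ['F', '\n']) = true) ∨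
      ((PySem.Chars.endswith s.toList ['\n', 'E'] || PySem.Chars.endswith s.toList ['\n', 'F']) = true) ∨
      ((PySem.Chars.isIn ['\n', 'E', '\n'] s.toList || PySem.Chars.isIn ['\n', 'F', '\n'] s.toList) = true))
  · rw [if_pos (by
      rcases hGiff.mpr hG with h | h <;> simp [List.contains_iff_mem, h])]
    by_cases h1 : (s.toList = ['E'] ∨ s.toList = ['F'])
    · rw [if_pos h1]
    · rw [if_neg h1]
      by_cases h2 : (PySem.Chars.startswith s.toList ['E', '\n'] || PySem.Chars.startswith s.toList ['F', '\n']) = true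
      · rw [if_pos h2]
      · rw [if_neg h2]
        by_cases h3 : (PySem.Chars.endswith s.toList ['\n', 'E'] || PySem.Chars.endswith s.toList ['\n', 'F']) = true
        · rw [if_pos h3]
        · rw [if_neg h3]
          rw [if_pos (by tauto)]
  · rw [if_neg (by
      intro h
      exact hG (hGiff.mp (by
        rcases Bool.or_eq_true_iff.mp h with h' | h'
        · exact Or.inl (by simpa [List.contains_iff_mem] using h')
        · exact Or.inr (by simpa [List.contains_iff_mem] using h'))))]
    rw [if_neg (fun h => hG (Or.inl h)),
        if_neg (fun h => hG (Or.inr (Or.inl h))),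
        if_neg (fun h => hG (Or.inr (Or.inr (Or.inl h)))),
        if_neg (fun h => hG (Or.inr (Or.inr (Or.inr h))))]
    have hlen : ((pvLinesP s.toList).1 :: (pvLinesP s.toList).2).length =
        s.toList.count '\n' + 1 := by simp [pvLines_length]
    rw [hlen, pvCount_eq]
    push_cast
    ring_nf
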